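-- pv_equiv track=rewrite | github.com/bsagoob/NovikovS2 | 21.03n3.py | can_form_name
-- ===== SOURCE A (Python) =====
-- from collections import Counter
--
-- def can_form_name(cubes, name):
--
--     name_count = Counter(name)
--
--     cube_count = Counter()
--
--     for cube in cubes:
--         cube_count.update(cube)
--
--     for letter, count in name_count.items():
--         if count > cube_count[letter]:
--             return False
--     return True
-- ===== SOURCE B (Python) =====
-- def can_form_name(cubes, name):
--     pool = sorted(ch for cube in cubes for ch in cube)
--     need = sorted(name)
--     i = 0
--     for ch in need:
--         while i < len(pool) and pool[i] < ch:
--             i += 1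
--         if i == len(pool) or pool[i] != ch:
--             return False
--         i += 1
--     return True
-- ===== Notes on version B (the rewrite author's own statement) =====
-- stated objective: alternative
-- what changed: B does no counting at all: it sorts the pooled cube letters and the name's letters and runs a two-pointer merge scan, checking that sorted(name) embeds as a subsequence of the sorted letter pool; A builds two Counters and compares per distinct letter.
import Mathlib
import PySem

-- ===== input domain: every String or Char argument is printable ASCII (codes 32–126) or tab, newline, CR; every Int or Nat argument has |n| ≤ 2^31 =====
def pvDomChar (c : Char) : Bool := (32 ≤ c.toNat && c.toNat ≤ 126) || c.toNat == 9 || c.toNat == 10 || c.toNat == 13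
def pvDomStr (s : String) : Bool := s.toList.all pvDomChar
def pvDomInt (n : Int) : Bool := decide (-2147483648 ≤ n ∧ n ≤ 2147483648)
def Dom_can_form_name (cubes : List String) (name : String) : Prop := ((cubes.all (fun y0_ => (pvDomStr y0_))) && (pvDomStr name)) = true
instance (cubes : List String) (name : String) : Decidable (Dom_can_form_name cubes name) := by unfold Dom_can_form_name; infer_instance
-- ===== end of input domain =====

-- B replaces A's two Counters by sort + two-pointer merge (same result, alternative algorithm).

-- ===== PORT A =====
-- name_count = Counter(name); cube_count = Counter(); for cube in cubes: cube_count.update(cube);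
-- then the early-return check over name_count.items().
def can_form_name (cubes : List String) (name : String) : Bool :=
  let name_count : PySem.Dict Char Int := PySem.Dict.counter name.toList
  let cube_count : PySem.Dict Char Int :=
    cubes.foldl (fun d cube => cube.toList.foldl (fun d c => d.modify c 0 (· + 1)) d) PySem.Dict.empty
  name_count.items.all (fun p => !(decide (p.2 > cube_count.getD p.1 0)))

-- ===== PORT B =====
-- Source B's merge loop over the sorted name: the inner 'while i < len(pool) and pool[i] < ch: i += 1'
-- is dropWhile (the index i consumes the pool list), then the equality check and the early return False.
def pvMatch : List Char → List Char → Bool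
  | [], _ => true
  | ch :: rest, pool =>
    match pool.dropWhile (fun p => decide (p < ch)) with
    | [] => false
    | p :: tail => if p = ch then pvMatch rest tail else false

def can_form_name_alt (cubes : List String) (name : String) : Bool :=
  let pool := PySem.List.sorted (cubes.flatMap String.toList) (fun x => x) false
  let need := PySem.List.sorted name.toList (fun x => x) false
  pvMatch need pool

-- ===== PRECONDITION & SPEC =====
def Spec_can_form_name (cubes : List String) (name : String) (out : Bool) : Prop := out = can_form_name_alt cubes name
instance (cubes : List String) (name : String) (out : Bool) : Decidable (Spec_can_form_name cubes name out) := by unfold Spec_can_form_name; infer_instance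

-- ===== CLAIM (what is proved, stated in full; the proofs are below) =====
def Claim_equal_can_form_name : Prop := ∀ (cubes : List String) (name : String), Dom_can_form_name cubes name → Spec_can_form_name cubes name (can_form_name cubes name)

-- ===== LEMMAS AND PROOFS =====

-- A's nested Counter fold, looked up at v, is the count of v in the flattened cube letters
theorem pv_cube_count_getD (cubes : List String) (v : Char) :
    ((cubes.foldl (fun d cube => cube.toList.foldl (fun d c => d.modify c 0 (· + 1)) d) (PySem.Dict.empty : PySem.Dict Char Int)).getD v 0)
      = ((cubes.flatMap String.toList).count v : Int) := by
  suffices h : ∀ (d : PySem.Dict Char Int),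
      ((cubes.foldl (fun d cube => cube.toList.foldl (fun d c => d.modify c 0 (· + 1)) d) d).getD v 0)
        = d.getD v 0 + ((cubes.flatMap String.toList).count v : Int) by
    rw [h]; simp [PySem.Dict.getD, PySem.Dict.empty, PySem.Dict.get?]
  induction cubes with
  | nil => intro d; simp
  | cons cube rest ih =>
    intro d
    simp only [List.foldl_cons, List.flatMap_cons, List.count_append]
    rw [ih, PySem.Dict.getD_foldl_modify_add_one]
    push_cast; ring

-- A's items-check succeeds iff every character of the name fits in the flattened cube letters
theorem pv_A_iff (cubes : List String) (name : String) :
    can_form_name cubes name = true ↔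
      ∀ c ∈ name.toList, name.toList.count c ≤ (cubes.flatMap String.toList).count c := by
  simp only [can_form_name]
  rw [show (PySem.Dict.counter name.toList).items
        = (PySem.Set.ofList name.toList).map (fun k => (k, (name.toList.count k : Int))) from
      PySem.Dict.items_counter name.toList]
  simp only [List.all_eq_true, List.mem_map]
  constructor
  · intro h c hc
    have := h (c, (name.toList.count c : Int)) ⟨c, (PySem.Set.mem_ofList _ c).mpr hc, rfl⟩
    simp only [pv_cube_count_getD] at this
    simp at this
    exact_mod_cast this
  · intro h p hp
    obtain ⟨k, hk, rfl⟩ := hp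
    have := h k ((PySem.Set.mem_ofList _ k).mp hk)
    simp [pv_cube_count_getD]
    exact_mod_cast this

-- B's merge scan over sorted lists decides multiset containment (subpermutation)
theorem pv_match_iff (need pool : List Char)
    (hn : need.Pairwise (· ≤ ·)) (hp : pool.Pairwise (· ≤ ·)) :
    pvMatch need pool = true ↔ List.Subperm need pool := by
  induction need generalizing pool with
  | nil => simp [pvMatch, List.nil_subperm]
  | cons ch rest ih =>
    have htw : ∀ x ∈ pool.takeWhile (fun p => decide (p < ch)), x < ch := by
      intro x hx
      have := List.mem_takeWhile_imp hx
      simpa using this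
    have hsplit : pool.takeWhile (fun p => decide (p < ch)) ++ pool.dropWhile (fun p => decide (p < ch)) = pool :=
      List.takeWhile_append_dropWhile
    have hdp_sorted : (pool.dropWhile (fun p => decide (p < ch))).Pairwise (· ≤ ·) :=
      hp.sublist (List.dropWhile_sublist _)
    have hcount_tw : (pool.takeWhile (fun p => decide (p < ch))).count ch = 0 := by
      rw [List.count_eq_zero]
      intro hmem
      exact absurd (htw ch hmem) (lt_irrefl ch)
    have hcount_tw' : ∀ x, ch ≤ x → (pool.takeWhile (fun p => decide (p < ch))).count x = 0 := by
      intro x hx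
      rw [List.count_eq_zero]
      intro hmem
      exact absurd (htw x hmem) (not_lt.mpr hx)
    cases hdp : pool.dropWhile (fun p => decide (p < ch)) with
    | nil =>
      simp only [pvMatch, hdp]
      constructor
      · intro h; cases h
      · intro h
        have hchp : ch ∈ pool := h.subset (List.mem_cons_self)
        rw [← hsplit, hdp, List.append_nil] at hchp
        exact absurd (htw ch hchp) (lt_irrefl ch)
    | cons p tail =>
      have hple : ¬ (p < ch) := by
        have := List.head?_dropWhile_not (fun q => decide (q < ch)) pool
        rw [hdp] at this
        simpa using this
      have hptail : ∀ x ∈ tail, p ≤ x := by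
        intro x hx
        rw [hdp] at hdp_sorted
        exact (List.pairwise_cons.mp hdp_sorted).1 x hx
      by_cases hpc : p = ch
      · subst hpc
        simp only [pvMatch, hdp, if_true]
        have hrest : ∀ x ∈ rest, p ≤ x := (List.pairwise_cons.mp hn).1
        rw [ih _ (List.pairwise_cons.mp hn).2 (List.pairwise_cons.mp (hdp ▸ hdp_sorted)).2]
        constructor
        · intro h
          have h1 : List.Subperm (p :: rest) (p :: tail) := (List.subperm_cons p).mpr h
          have h2 : List.Sublist (p :: tail) pool := by
            rw [← hsplit, hdp]; exact List.sublist_append_right _ _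
          exact h1.trans h2.subperm
        · intro h
          have hcnt := List.subperm_ext_iff.mp h
          rw [List.subperm_ext_iff]
          intro x hx
          have hx' : p ≤ x := hrest x hx
          have hc := hcnt x (List.mem_cons_of_mem _ hx)
          rw [← hsplit, hdp, List.count_append, hcount_tw' x hx'] at hc
          by_cases hxp : x = p
          · subst hxp
            simp only [List.count_cons_self] at hc
            omega
          · simp only [List.count_cons] at hc
            generalize (if (p == x) = true then 1 else 0) = k at hc
            omega
      · simp only [pvMatch, hdp, if_neg hpc]
        constructor
        · intro h; cases h
        · intro h
          have hchp : ch ∈ pool := h.subset (List.mem_cons_self)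
          rw [← hsplit, hdp] at hchp
          rcases List.mem_append.mp hchp with h1 | h1
          · exact absurd (htw ch h1) (lt_irrefl ch)
          · rcases List.mem_cons.mp h1 with h2 | h2
            · exact (hpc h2.symm).elim
            · have hle1 : p ≤ ch := hptail ch h2
              exact (hpc (le_antisymm hle1 (not_lt.mp hple))).elim

-- ===== VERDICT (by name: the statement is the Claim_ definition above) =====
theorem can_form_name_spec : Claim_equal_can_form_name := by
  intro cubes name _
  unfold Spec_can_form_name
  have hB : can_form_name_alt cubes name = true ↔ List.Subperm name.toList (cubes.flatMap String.toList) := by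
    simp only [can_form_name_alt]
    rw [pv_match_iff _ _ (PySem.List.sorted_pairwise _ _) (PySem.List.sorted_pairwise _ _)]
    exact ((PySem.List.sorted_perm (cubes.flatMap String.toList) (fun x => x) false).subperm_left).trans
      ((PySem.List.sorted_perm name.toList (fun x => x) false).subperm_right)
  have hA : can_form_name cubes name = true ↔ List.Subperm name.toList (cubes.flatMap String.toList) := by
    rw [pv_A_iff, List.subperm_ext_iff]
  cases h1 : can_form_name cubes name <;> cases h2 : can_form_name_alt cubes name <;> simp_all
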